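-- pv_equiv track=rewrite | github.com/An77C/ems-bom-flatten-tool | bom_excel_tool.py | _resolve_ecode_source_column
-- ===== SOURCE A (Python) =====
-- from typing import Any, Iterable, Sequence
--
-- def _resolve_column_name(columns: Sequence[str], preferred: str) -> str | None:
--     """先找完全相等，找不到再找開頭相符（忽略大小寫）。"""
--     preferred_lower = preferred.lower()
--     for col in columns:
--         if col.lower() == preferred_lower:
--             return col
--     for col in columns:
--         if col.lower().startswith(preferred_lower):
--             return col
--     return None
--
-- def _resolve_ecode_source_column(columns: Sequence[str]) -> str | None:
--     ecode_col = _resolve_column_name(columns, "Customer PN")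
--     if ecode_col:
--         return ecode_col
--     for col in columns:
--         col_key = col.lower().replace(" ", "")
--         if "customer" in col_key and (
--             "pn" in col_key or "partnumber" in col_key or "partno" in col_key
--         ):
--             return col
--     return None
-- ===== SOURCE B (Python) =====
-- def _resolve_ecode_source_column(columns):
--     def tier(col):
--         low = col.lower()
--         if low == "customer pn":
--             return 0
--         if low.startswith("customer pn"):
--             return 1
--         key = low.replace(" ", "")
--         if "customer" in key and ("pn" in key or "partnumber" in key or "partno" in key):
--             return 2
--         return 3
--
--     best_tier = 3
--     best_col = None
--     for col in columns:
--         t = tier(col)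
--         if t < best_tier:
--             best_tier = t
--             best_col = col
--     return best_col
-- ===== Notes on version B (the rewrite author's own statement) =====
-- stated objective: alternative
-- what changed: Replaced A's three sequential scans (exact, prefix, fuzzy) by a helper classifying each column into a priority tier and one pass keeping the first column of the lowest tier seen.
import Mathlib
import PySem

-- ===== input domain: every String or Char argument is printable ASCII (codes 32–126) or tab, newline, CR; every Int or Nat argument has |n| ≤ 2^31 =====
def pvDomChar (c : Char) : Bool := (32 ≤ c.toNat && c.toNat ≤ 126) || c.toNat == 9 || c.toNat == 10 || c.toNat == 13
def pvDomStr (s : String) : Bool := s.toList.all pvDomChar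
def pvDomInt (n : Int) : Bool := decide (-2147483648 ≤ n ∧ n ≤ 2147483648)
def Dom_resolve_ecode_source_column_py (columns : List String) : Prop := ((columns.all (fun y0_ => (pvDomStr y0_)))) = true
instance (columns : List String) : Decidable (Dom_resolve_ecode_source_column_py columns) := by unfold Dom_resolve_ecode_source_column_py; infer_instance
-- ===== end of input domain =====

-- B replaces A's three sequential scans by one classifying pass keeping the first column of the lowest
-- priority tier (alternative decomposition; same asymptotic cost).

-- ===== PORT A =====
-- first loop of _resolve_column_name: exact (case-insensitive) match
def pvScanExact (columns : List String) (pl : String) : Option String :=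
  match columns with
  | [] => none
  | c :: cs => if PySem.Str.lower c == pl then some c else pvScanExact cs pl

-- second loop of _resolve_column_name: prefix match
def pvScanPrefix (columns : List String) (pl : String) : Option String :=
  match columns with
  | [] => none
  | c :: cs => if PySem.Str.startswith (PySem.Str.lower c) pl then some c else pvScanPrefix cs pl

def resolve_column_name (columns : List String) (preferred : String) : Option String :=
  let preferred_lower := PySem.Str.lower preferred
  match pvScanExact columns preferred_lower with
  | some c => some c
  | none => pvScanPrefix columns preferred_lower

-- the fuzzy loop of _resolve_ecode_source_column
def pvScanFuzzy (columns : List String) : Option String :=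
  match columns with
  | [] => none
  | c :: cs =>
    let col_key := PySem.Str.replace (PySem.Str.lower c) " " ""
    if PySem.Str.isIn "customer" col_key &&
        (PySem.Str.isIn "pn" col_key || PySem.Str.isIn "partnumber" col_key ||
         PySem.Str.isIn "partno" col_key)
    then some c else pvScanFuzzy cs

def resolve_ecode_source_column_py (columns : List String) : Option String :=
  match resolve_column_name columns "Customer PN" with
  | some c => if c == "" then pvScanFuzzy columns else some c   -- 'if ecode_col:' truthiness
  | none => pvScanFuzzy columns

-- ===== PORT B =====
def pvTier (col : String) : Nat :=
  let low := PySem.Str.lower col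
  if low == "customer pn" then 0
  else if PySem.Str.startswith low "customer pn" then 1
  else
    let key := PySem.Str.replace low " " ""
    if PySem.Str.isIn "customer" key &&
        (PySem.Str.isIn "pn" key || PySem.Str.isIn "partnumber" key ||
         PySem.Str.isIn "partno" key)
    then 2 else 3

def pvBestLoop : List String → Nat → Option String → Option String
  | [], _, best_col => best_col
  | c :: cs, best_tier, best_col =>
    if pvTier c < best_tier then pvBestLoop cs (pvTier c) (some c)
    else pvBestLoop cs best_tier best_col

def resolve_ecode_source_column_py_alt (columns : List String) : Option String :=
  pvBestLoop columns 3 none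

-- ===== PRECONDITION & SPEC =====
def Spec_resolve_ecode_source_column_py (columns : List String) (out : Option String) : Prop := out = resolve_ecode_source_column_py_alt columns
instance (columns : List String) (out : Option String) : Decidable (Spec_resolve_ecode_source_column_py columns out) := by unfold Spec_resolve_ecode_source_column_py; infer_instance

-- ===== CLAIM (what is proved, stated in full; the proofs are below) =====
def Claim_equal_resolve_ecode_source_column_py : Prop := ∀ (columns : List String), Dom_resolve_ecode_source_column_py columns → Spec_resolve_ecode_source_column_py columns (resolve_ecode_source_column_py columns)

-- ===== LEMMAS AND PROOFS =====

-- proof-side names for the three tests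
def pvE (c : String) : Bool := PySem.Str.lower c == "customer pn"
def pvP (c : String) : Bool := PySem.Str.startswith (PySem.Str.lower c) "customer pn"
def pvF (c : String) : Bool :=
  let key := PySem.Str.replace (PySem.Str.lower c) " " ""
  PySem.Str.isIn "customer" key &&
    (PySem.Str.isIn "pn" key || PySem.Str.isIn "partnumber" key || PySem.Str.isIn "partno" key)

theorem pvTier_eq (c : String) :
    pvTier c = if pvE c then 0 else if pvP c then 1 else if pvF c then 2 else 3 := rfl

theorem pvE_imp_pvP {c : String} (h : pvE c = true) : pvP c = true := by
  have he : PySem.Str.lower c = "customer pn" := by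
    simpa [pvE] using h
  simp [pvP, he]
  decide

theorem pvTier_le_three (c : String) : pvTier c ≤ 3 := by
  rw [pvTier_eq]; split_ifs <;> omega

theorem pvTier_eq_zero_iff (c : String) : pvTier c = 0 ↔ pvE c = true := by
  rw [pvTier_eq]; split_ifs <;> simp_all

theorem pvTier_le_one_iff (c : String) : pvTier c ≤ 1 ↔ pvP c = true := by
  rw [pvTier_eq]
  by_cases h1 : pvE c = true
  · simp [h1, pvE_imp_pvP h1]
  · simp [h1]; split_ifs <;> simp_all

theorem pvTier_le_two_iff (c : String) : pvTier c ≤ 2 ↔ (pvP c = true ∨ pvF c = true) := by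
  rw [pvTier_eq]
  by_cases h1 : pvE c = true
  · simp [h1, pvE_imp_pvP h1]
  · simp only [h1]
    by_cases hp : pvP c = true
    · simp [hp]
    · simp only [hp]
      by_cases hf : pvF c = true
      · simp [hf]
      · simp [hf]

theorem pvP_ne_empty {c : String} (h : pvP c = true) : (c == "") = false := by
  by_cases he : c = ""
  · subst he; exact absurd h (by decide)
  · simpa using he

theorem pvFind?_cons_eq {α : Type} (p : α → Bool) (c : α) (cs : List α) :
    List.find? p (c :: cs) = if p c then some c else List.find? p cs := by
  cases h : p c
  · rw [if_neg (by simp [h]), List.find?_cons_of_neg (p := p) (by simp [h])]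
  · rw [if_pos (by simp [h]), List.find?_cons_of_pos (p := p) h]

-- the three scans are List.find?
theorem pvScanExact_eq_find? (columns : List String) (pl : String) :
    pvScanExact columns pl = columns.find? (fun c => PySem.Str.lower c == pl) := by
  induction columns with
  | nil => rfl
  | cons c cs ih =>
    rw [show pvScanExact (c :: cs) pl
          = if PySem.Str.lower c == pl then some c else pvScanExact cs pl from rfl, ih,
      pvFind?_cons_eq]

theorem pvScanPrefix_eq_find? (columns : List String) (pl : String) :
    pvScanPrefix columns pl = columns.find? (fun c => PySem.Str.startswith (PySem.Str.lower c) pl) := by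
  induction columns with
  | nil => rfl
  | cons c cs ih =>
    rw [show pvScanPrefix (c :: cs) pl
          = if PySem.Str.startswith (PySem.Str.lower c) pl then some c else pvScanPrefix cs pl from rfl, ih,
      pvFind?_cons_eq]

theorem pvScanFuzzy_eq_find? (columns : List String) :
    pvScanFuzzy columns = columns.find? pvF := by
  induction columns with
  | nil => rfl
  | cons c cs ih =>
    have hstep : pvScanFuzzy (c :: cs) = if pvF c then some c else pvScanFuzzy cs := rfl
    rw [hstep, ih, pvFind?_cons_eq]

theorem find?_congr_mem {l : List String} {p q : String → Bool}
    (h : ∀ c ∈ l, p c = q c) : l.find? p = l.find? q := by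
  induction l with
  | nil => rfl
  | cons c cs ih =>
    simp only [List.find?]
    rw [h c (List.mem_cons_self ..)]
    cases q c
    · exact ih (fun x hx => h x (List.mem_cons_of_mem _ hx))
    · rfl

-- minimum tier in the list (3 if empty / nothing matches)
def pvMinT (columns : List String) : Nat := columns.foldr (fun c m => min (pvTier c) m) 3

theorem pvMinT_nil : pvMinT [] = 3 := rfl

theorem pvMinT_cons (c : String) (cs : List String) :
    pvMinT (c :: cs) = min (pvTier c) (pvMinT cs) := rfl

theorem pvMinT_le_three (columns : List String) : pvMinT columns ≤ 3 := by
  induction columns with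
  | nil => simp [pvMinT_nil]
  | cons c cs ih => rw [pvMinT_cons]; omega

theorem pvMinT_le {columns : List String} {c : String} (h : c ∈ columns) :
    pvMinT columns ≤ pvTier c := by
  induction columns with
  | nil => cases h
  | cons d ds ih =>
    rcases List.mem_cons.mp h with rfl | h'
    · rw [pvMinT_cons]; omega
    · have := ih h'; rw [pvMinT_cons]; omega

theorem pvMinT_attained {columns : List String} (h : pvMinT columns < 3) :
    ∃ c ∈ columns, pvTier c = pvMinT columns := by
  induction columns with
  | nil => rw [pvMinT_nil] at h; omega
  | cons c cs ih =>
    rw [pvMinT_cons] at h ⊢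
    by_cases hc : pvTier c ≤ pvMinT cs
    · exact ⟨c, List.mem_cons_self .., by omega⟩
    · obtain ⟨d, hd, hdt⟩ := ih (by omega)
      exact ⟨d, List.mem_cons_of_mem _ hd, by omega⟩

-- B's loop computes the first column of the minimum tier
theorem pvFoldrMin_le_init (cs : List String) (x bt : Nat) (hx : x ≤ bt) :
    cs.foldr (fun c m => min (pvTier c) m) x
      = min x (cs.foldr (fun c m => min (pvTier c) m) bt) := by
  induction cs with
  | nil => simp; omega
  | cons d ds ih => simp only [List.foldr, ih]; omega

theorem pvBestLoop_spec (columns : List String) (bt : Nat) (bc : Option String) :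
    pvBestLoop columns bt bc =
      if columns.foldr (fun c m => min (pvTier c) m) bt < bt then
        columns.find? (fun c => pvTier c == columns.foldr (fun c m => min (pvTier c) m) bt)
      else bc := by
  induction columns generalizing bt bc with
  | nil => simp [pvBestLoop]
  | cons c cs ih =>
    simp only [pvBestLoop, List.foldr]
    by_cases hc : pvTier c < bt
    · rw [if_pos hc, ih, pvFoldrMin_le_init cs (pvTier c) bt (by omega)]
      by_cases hm : min (pvTier c) (cs.foldr (fun c m => min (pvTier c) m) bt) < pvTier c
      · rw [if_pos hm, if_pos (by omega)]
        have hne : (pvTier c == min (pvTier c) (cs.foldr (fun c m => min (pvTier c) m) bt)) = false := by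
          simp; omega
        rw [pvFind?_cons_eq, if_neg (by simp [hne])]
      · rw [if_neg hm, if_pos (by omega)]
        have heq : (pvTier c == min (pvTier c) (cs.foldr (fun c m => min (pvTier c) m) bt)) = true := by
          simp; omega
        rw [pvFind?_cons_eq, if_pos (by simp [heq])]
    · rw [if_neg hc, ih]
      by_cases h : cs.foldr (fun c m => min (pvTier c) m) bt < bt
      · rw [if_pos h, if_pos (by omega)]
        have hmeq : min (pvTier c) (cs.foldr (fun c m => min (pvTier c) m) bt)
            = cs.foldr (fun c m => min (pvTier c) m) bt := by omega
        rw [hmeq]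
        have hne : (pvTier c == cs.foldr (fun c m => min (pvTier c) m) bt) = false := by
          simp; omega
        rw [pvFind?_cons_eq, if_neg (by simp [hne])]
      · rw [if_neg h, if_neg (by omega)]

theorem pvAlt_eq (columns : List String) :
    resolve_ecode_source_column_py_alt columns =
      if pvMinT columns < 3 then columns.find? (fun c => pvTier c == pvMinT columns)
      else none := by
  simpa [resolve_ecode_source_column_py_alt, pvMinT] using pvBestLoop_spec columns 3 none

-- ===== VERDICT (by name: the statement is the Claim_ definition above) =====
theorem resolve_ecode_source_column_py_spec : Claim_equal_resolve_ecode_source_column_py := by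
  intro columns _
  show resolve_ecode_source_column_py columns = resolve_ecode_source_column_py_alt columns
  rw [pvAlt_eq]
  have hlow : PySem.Str.lower "Customer PN" = "customer pn" := rfl
  simp only [resolve_ecode_source_column_py, resolve_column_name, hlow,
    pvScanExact_eq_find?, pvScanPrefix_eq_find?, pvScanFuzzy_eq_find?]
  have h0123 : pvMinT columns = 0 ∨ pvMinT columns = 1 ∨ pvMinT columns = 2 ∨
      pvMinT columns = 3 := by
    have := pvMinT_le_three columns; omega
  rcases h0123 with hmin | hmin | hmin | hmin
  all_goals rw [hmin]
  · -- minT = 0 : some exact match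
    rw [if_pos (by omega)]
    obtain ⟨c₀, hc₀, ht₀⟩ := pvMinT_attained (columns := columns) (by omega)
    rw [hmin] at ht₀
    have hfind : columns.find? (fun c => PySem.Str.lower c == "customer pn")
        = columns.find? (fun c => pvTier c == 0) := by
      apply find?_congr_mem; intro c _
      rcases Bool.eq_false_or_eq_true (pvE c) with h | h
      · have h0 : pvTier c = 0 := (pvTier_eq_zero_iff c).mpr h
        have hb : (PySem.Str.lower c == "customer pn") = true := by simpa [pvE] using h
        simp [hb, h0]
      · have h0 : pvTier c ≠ 0 := fun h0 => by
          rw [(pvTier_eq_zero_iff c).mp h0] at h; cases h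
        have hb : (PySem.Str.lower c == "customer pn") = false := by simpa [pvE] using h
        simp [hb, h0]
    rw [hfind]
    obtain ⟨c, hc⟩ := Option.isSome_iff_exists.mp
      ((List.find?_isSome (p := fun c => pvTier c == 0) (xs := columns)).mpr
        ⟨c₀, hc₀, by simp [ht₀]⟩)
    have hcE : pvE c = true := by
      have h0 := List.find?_some hc
      simp only [beq_iff_eq] at h0
      exact (pvTier_eq_zero_iff c).mp h0
    rw [hc]
    simp [pvP_ne_empty (pvE_imp_pvP hcE)]
  · -- minT = 1 : no exact, first prefix match
    rw [if_pos (by omega)]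
    have hno0 : ∀ c ∈ columns, pvE c = false := by
      intro c hc
      have h1 : pvMinT columns ≤ pvTier c := pvMinT_le hc
      rcases Bool.eq_false_or_eq_true (pvE c) with h | h
      · have := (pvTier_eq_zero_iff c).mpr h; omega
      · exact h
    have he : columns.find? (fun c => PySem.Str.lower c == "customer pn") = none := by
      rw [List.find?_eq_none]; intro c hc; simpa [pvE] using hno0 c hc
    rw [he]
    have hfind : columns.find? (fun c => PySem.Str.startswith (PySem.Str.lower c) "customer pn")
        = columns.find? (fun c => pvTier c == 1) := by
      apply find?_congr_mem; intro c hc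
      have hE := hno0 c hc
      have h1 : 1 ≤ pvTier c := by
        rcases Nat.eq_zero_or_pos (pvTier c) with h0 | h0
        · rw [(pvTier_eq_zero_iff c).mp h0] at hE; cases hE
        · omega
      show PySem.Str.startswith (PySem.Str.lower c) "customer pn" = (pvTier c == 1)
      rcases Bool.eq_false_or_eq_true (pvP c) with h | h
      · have hle : pvTier c ≤ 1 := (pvTier_le_one_iff c).mpr h
        have hb : (pvTier c == 1) = true := by simp; omega
        rw [(show PySem.Str.startswith (PySem.Str.lower c) "customer pn" = true from h), hb]
      · have hnle : ¬ pvTier c ≤ 1 := fun hle => by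
          rw [(pvTier_le_one_iff c).mp hle] at h; cases h
        have hb : (pvTier c == 1) = false := by simp; omega
        rw [(show PySem.Str.startswith (PySem.Str.lower c) "customer pn" = false from h), hb]
    rw [hfind]
    obtain ⟨c₀, hc₀, ht₀⟩ := pvMinT_attained (columns := columns) (by omega)
    rw [hmin] at ht₀
    obtain ⟨c, hc⟩ := Option.isSome_iff_exists.mp
      ((List.find?_isSome (p := fun c => pvTier c == 1) (xs := columns)).mpr
        ⟨c₀, hc₀, by simp [ht₀]⟩)
    have hct : pvTier c = 1 := by
      have h1 := List.find?_some hc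
      simpa only [beq_iff_eq] using h1
    have hcP : pvP c = true := (pvTier_le_one_iff c).mp (by omega)
    rw [hc]
    simp [pvP_ne_empty hcP]
  · -- minT = 2 : no exact, no prefix, first fuzzy match
    rw [if_pos (by omega)]
    have hge2 : ∀ c ∈ columns, 2 ≤ pvTier c := by
      intro c hc; have := pvMinT_le hc; omega
    have he : columns.find? (fun c => PySem.Str.lower c == "customer pn") = none := by
      rw [List.find?_eq_none]; intro c hc hcon
      have : pvTier c = 0 := (pvTier_eq_zero_iff c).mpr (by simpa [pvE] using hcon)
      have := hge2 c hc; omega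
    have hp : columns.find?
        (fun c => PySem.Str.startswith (PySem.Str.lower c) "customer pn") = none := by
      rw [List.find?_eq_none]; intro c hc hcon
      have : pvTier c ≤ 1 := (pvTier_le_one_iff c).mpr (by simpa [pvP] using hcon)
      have := hge2 c hc; omega
    rw [he, hp]
    apply find?_congr_mem; intro c hc
    have h2 := hge2 c hc
    rcases Bool.eq_false_or_eq_true (pvF c) with h | h
    · rw [h]
      have hle : pvTier c ≤ 2 := (pvTier_le_two_iff c).mpr (Or.inr h)
      have hb : (pvTier c == 2) = true := by simp; omega
      rw [hb]
    · rw [h]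
      have hnle : ¬ pvTier c ≤ 2 := by
        rw [pvTier_le_two_iff]
        rintro (hP | hF)
        · have := (pvTier_le_one_iff c).mpr hP; omega
        · rw [hF] at h; cases h
      have hb : (pvTier c == 2) = false := by simp; omega
      rw [hb]
  · -- minT = 3 : nothing matches
    rw [if_neg (by omega)]
    have hge3 : ∀ c ∈ columns, pvTier c = 3 := by
      intro c hc
      have := pvMinT_le hc; have := pvTier_le_three c; omega
    have he : columns.find? (fun c => PySem.Str.lower c == "customer pn") = none := by
      rw [List.find?_eq_none]; intro c hc hcon
      have : pvTier c = 0 := (pvTier_eq_zero_iff c).mpr (by simpa [pvE] using hcon)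
      have := hge3 c hc; omega
    have hp : columns.find?
        (fun c => PySem.Str.startswith (PySem.Str.lower c) "customer pn") = none := by
      rw [List.find?_eq_none]; intro c hc hcon
      have : pvTier c ≤ 1 := (pvTier_le_one_iff c).mpr (by simpa [pvP] using hcon)
      have := hge3 c hc; omega
    have hf : columns.find? pvF = none := by
      rw [List.find?_eq_none]; intro c hc hcon
      have : pvTier c ≤ 2 := (pvTier_le_two_iff c).mpr (Or.inr (by simpa using hcon))
      have := hge3 c hc; omega
    rw [he, hp, hf]
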